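-- pv_equiv track=rewrite | github.com/rn3r/underground.py | gateway/client.py | combine_args
-- ===== SOURCE A (Python) =====
-- def combine_args(args):
--     combined_args = [args[0]]
--     quote_buffer = None
--
--     args = args[1:]
--
--     for arg in args:
--         if quote_buffer is None:
--             if arg.startswith('"'):
--                 quote_buffer = arg[1:]
--             else:
--                 combined_args.append(arg)
--         else:
--             if arg.endswith('"'):
--                 combined_args.append(quote_buffer + ' ' + arg[:-1])
--                 quote_buffer = None
--             else:
--                 quote_buffer += ' ' + arg
--
--     return combined_args
-- ===== SOURCE B (Python) =====
-- def combine_args(args):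
--     combined = [args[0]]
--     n = len(args)
--     i = 1
--     while i < n:
--         tok = args[i]
--         if tok.startswith('"'):
--             parts = [tok[1:]]
--             i += 1
--             while i < n and not args[i].endswith('"'):
--                 parts.append(args[i])
--                 i += 1
--             if i < n:  # closing token found; otherwise the unclosed buffer is dropped
--                 combined.append(' '.join(parts + [args[i][:-1]]))
--                 i += 1
--         else:
--             combined.append(tok)
--             i += 1
--     return combined
-- ===== Notes on version B (the rewrite author's own statement) =====
-- stated objective: alternative
-- what changed: Replaced A's single pass with an Optional quote_buffer string flag by an explicit index while-loop whose nested inner scan collects the quoted tokens into a parts list and joins them only when the closing token is found.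
import Mathlib
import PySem

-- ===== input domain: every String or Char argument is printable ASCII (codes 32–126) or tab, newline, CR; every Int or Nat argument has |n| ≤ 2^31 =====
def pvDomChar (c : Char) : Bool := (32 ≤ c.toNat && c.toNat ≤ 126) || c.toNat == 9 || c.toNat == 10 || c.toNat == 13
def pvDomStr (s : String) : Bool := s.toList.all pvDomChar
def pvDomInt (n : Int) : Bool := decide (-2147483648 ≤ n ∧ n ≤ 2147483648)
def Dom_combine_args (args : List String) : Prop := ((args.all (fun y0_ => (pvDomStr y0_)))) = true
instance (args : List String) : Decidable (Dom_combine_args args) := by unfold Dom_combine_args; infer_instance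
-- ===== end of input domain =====

-- B replaces A's fold with an Optional quote_buffer by an explicit index loop with a nested
-- scan that collects quoted tokens into a parts list (objective: alternative decomposition, same cost).
-- ===== PORT A =====
def caStep (st : List String × Option String) (arg : String) : List String × Option String :=
  match st.2 with
  | none =>
    if PySem.Str.startswith arg "\"" then (st.1, some (PySem.Str.slice arg (some 1) none))
    else (st.1 ++ [arg], none)
  | some qb =>
    if PySem.Str.endswith arg "\"" then
      (st.1 ++ [qb ++ " " ++ PySem.Str.slice arg none (some (-1))], none)
    else (st.1, some (qb ++ " " ++ arg))

def combine_args (args : List String) : List String :=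
  ((PySem.List.slice args (some 1) none).foldl caStep
    ([PySem.List.pyGetD args 0 ""], none)).1

-- ===== PORT B =====
-- inner 'while i < n and not args[i].endswith('"')' loop (fuel = remaining tokens): returns (parts, i) at exit
def caInner (args : List String) : Nat → List String → Nat → List String × Nat
  | 0, parts, i => (parts, i)
  | fuel + 1, parts, i =>
    if i < args.length ∧ ¬ (PySem.Str.endswith (args.getD i "") "\"" = true) then
      caInner args fuel (parts ++ [args.getD i ""]) (i + 1)
    else (parts, i)

-- outer 'while i < n' loop (fuel = remaining tokens), producing the tokens appended to combined
def caOuter (args : List String) : Nat → Nat → List String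
  | 0, _ => []
  | fuel + 1, i =>
    if i < args.length then
      let tok := args.getD i ""
      if PySem.Str.startswith tok "\"" then
        let pj := caInner args (args.length - (i + 1)) [PySem.Str.slice tok (some 1) none] (i + 1)
        if pj.2 < args.length then
          PySem.Str.join " " (pj.1 ++ [PySem.Str.slice (args.getD pj.2 "") none (some (-1))]) ::
            caOuter args fuel (pj.2 + 1)
        else []
      else tok :: caOuter args fuel (i + 1)
    else []

def combine_args_alt (args : List String) : List String :=
  PySem.List.pyGetD args 0 "" :: caOuter args args.length 1

-- ===== PRECONDITION & SPEC =====
-- A raises IndexError on args = [] (args[0]); B raises there too, so the empty list is excluded.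
def Pre_combine_args (args : List String) : Prop := args ≠ []
instance (args : List String) : Decidable (Pre_combine_args args) := by unfold Pre_combine_args; infer_instance
def pvWitness_combine_args : List String := ["a", "\"b", "c\""]
def Spec_combine_args (args : List String) (out : List String) : Prop := out = combine_args_alt args
instance (args : List String) (out : List String) : Decidable (Spec_combine_args args out) := by unfold Spec_combine_args; infer_instance

-- ===== CLAIM (what is proved, stated in full; the proofs are below) =====
def Claim_equal_combine_args : Prop := ∀ (args : List String), Dom_combine_args args → Pre_combine_args args → Spec_combine_args args (combine_args args)

-- ===== LEMMAS AND PROOFS =====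

-- proof-side recursive description of A's fold, bridging to B's index loops
mutual
def caRest : List String → List String
  | [] => []
  | tok :: rest =>
    if PySem.Str.startswith tok "\"" then caClose [PySem.Str.slice tok (some 1) none] rest
    else tok :: caRest rest
def caClose (parts : List String) : List String → List String
  | [] => []
  | tok :: rest =>
    if PySem.Str.endswith tok "\"" then
      PySem.Str.join " " (parts ++ [PySem.Str.slice tok none (some (-1))]) :: caRest rest
    else caClose (parts ++ [tok]) rest
end

theorem str_ext {a b : String} (h : a.toList = b.toList) : a = b := by
  simpa using congrArg String.ofList h

theorem chars_join_cons_ne (sep p : List Char) (ps : List (List Char)) (h : ps ≠ []) :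
    PySem.Chars.join sep (p :: ps) = p ++ sep ++ PySem.Chars.join sep ps := by
  cases ps with
  | nil => exact absurd rfl h
  | cons q qs => exact PySem.Chars.join_cons_cons sep p q qs

theorem chars_join_append_singleton (sep x : List Char) :
    ∀ (parts : List (List Char)), parts ≠ [] →
      PySem.Chars.join sep (parts ++ [x]) = PySem.Chars.join sep parts ++ sep ++ x
  | [], h => absurd rfl h
  | p :: ps, _ => by
      cases ps with
      | nil => simp [PySem.Chars.join_cons_cons, PySem.Chars.join_singleton]
      | cons q qs =>
        have ih := chars_join_append_singleton sep x (q :: qs) (by simp)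
        rw [List.cons_append, chars_join_cons_ne sep p ((q :: qs) ++ [x]) (by simp), ih,
          chars_join_cons_ne sep p (q :: qs) (by simp)]
        simp [List.append_assoc]

theorem join_append_singleton (parts : List String) (x : String) (h : parts ≠ []) :
    PySem.Str.join " " (parts ++ [x]) = PySem.Str.join " " parts ++ " " ++ x := by
  apply str_ext
  rw [PySem.Str.toList_join, List.map_append, List.map_cons, List.map_nil,
    chars_join_append_singleton (" ".toList) x.toList (parts.map String.toList)
      (by simpa using h)]
  simp [PySem.Str.toList_join]

theorem join_singleton' (x : String) : PySem.Str.join " " [x] = x := by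
  apply str_ext
  rw [PySem.Str.toList_join, List.map_cons, List.map_nil, PySem.Chars.join_singleton]

-- A's fold computes caRest / caClose
theorem fold_eq (l : List String) :
    (∀ acc, (l.foldl caStep (acc, none)).1 = acc ++ caRest l) ∧
    (∀ acc parts, parts ≠ [] →
      (l.foldl caStep (acc, some (PySem.Str.join " " parts))).1 = acc ++ caClose parts l) := by
  induction l with
  | nil => simp [caRest, caClose]
  | cons tok rest ih =>
    constructor
    · intro acc
      simp only [List.foldl_cons, caStep, caRest]
      split_ifs with h
      · have h2 := ih.2 acc [PySem.Str.slice tok (some 1) none] (by simp)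
        rw [join_singleton'] at h2
        simpa [h] using h2
      · simpa using ih.1 (acc ++ [tok])
    · intro acc parts hp
      simp only [List.foldl_cons, caStep, caClose]
      split_ifs with h
      · simp [ih.1, join_append_singleton parts _ hp]
      · rw [← join_append_singleton parts tok hp]
        simpa [h] using ih.2 acc (parts ++ [tok]) (by simp)

theorem drop_cons_getD (args : List String) (i : Nat) (h : i < args.length) :
    args.drop i = args.getD i "" :: args.drop (i + 1) := by
  rw [List.getD_eq_getElem args "" h, List.drop_eq_getElem_cons h]

-- B's inner loop computes caClose (given enough fuel)
theorem inner_eq (args : List String) :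
    ∀ (fuel : Nat) (parts : List String) (i : Nat), args.length ≤ fuel + i →
    caClose parts (args.drop i) =
      (if (caInner args fuel parts i).2 < args.length then
        PySem.Str.join " " ((caInner args fuel parts i).1 ++
          [PySem.Str.slice (args.getD (caInner args fuel parts i).2 "") none (some (-1))]) ::
          caRest (args.drop ((caInner args fuel parts i).2 + 1))
      else []) := by
  intro fuel
  induction fuel with
  | zero =>
    intro parts i hf
    rw [List.drop_eq_nil_of_le (by omega)]
    simp [caInner, caClose, show ¬ i < args.length by omega]
  | succ fuel ih =>
    intro parts i hf
    by_cases hc : i < args.length ∧ ¬ (PySem.Str.endswith (args.getD i "") "\"" = true)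
    · obtain ⟨hi, hend⟩ := hc
      rw [drop_cons_getD args i hi]
      simp only [caInner, if_pos (show _ ∧ _ from ⟨hi, hend⟩), caClose, if_neg hend]
      exact ih (parts ++ [args.getD i ""]) (i + 1) (by omega)
    · simp only [caInner, if_neg hc]
      by_cases hi : i < args.length
      · have hend : PySem.Str.endswith (args.getD i "") "\"" = true := by
          by_contra hc2; exact hc ⟨hi, hc2⟩
        rw [drop_cons_getD args i hi]
        simp only [caClose, if_pos hend, if_pos hi]
      · rw [List.drop_eq_nil_of_le (by omega)]
        simp [caClose, hi]

-- the inner loop never moves the index backwards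
theorem caInner_snd_ge (args : List String) :
    ∀ (fuel : Nat) (parts : List String) (i : Nat), i ≤ (caInner args fuel parts i).2 := by
  intro fuel
  induction fuel with
  | zero => intro parts i; simp [caInner]
  | succ fuel ih =>
    intro parts i
    simp only [caInner]
    split_ifs with hc
    · have := ih (parts ++ [args.getD i ""]) (i + 1); omega
    · simp

-- B's outer loop computes caRest (given enough fuel)
theorem outer_eq (args : List String) :
    ∀ (fuel : Nat) (i : Nat), args.length ≤ fuel + i →
    caOuter args fuel i = caRest (args.drop i) := by
  intro fuel
  induction fuel with
  | zero =>
    intro i hf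
    rw [List.drop_eq_nil_of_le (by omega)]
    simp [caOuter, caRest]
  | succ fuel ih =>
    intro i hf
    simp only [caOuter]
    by_cases hi : i < args.length
    · rw [if_pos hi, drop_cons_getD args i hi]
      simp only [caRest]
      by_cases hs : PySem.Str.startswith (args.getD i "") "\"" = true
      · rw [if_pos hs, if_pos hs,
          inner_eq args (args.length - (i + 1)) [PySem.Str.slice (args.getD i "") (some 1) none]
            (i + 1) (by omega)]
        by_cases h2 : (caInner args (args.length - (i + 1))
            [PySem.Str.slice (args.getD i "") (some 1) none] (i + 1)).2 < args.length
        · rw [if_pos h2, if_pos h2, ih _ (by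
            have := caInner_snd_ge args (args.length - (i + 1))
              [PySem.Str.slice (args.getD i "") (some 1) none] (i + 1)
            omega)]
        · rw [if_neg h2, if_neg h2]
      · rw [if_neg hs, if_neg hs, ih (i + 1) (by omega)]
    · rw [if_neg hi, List.drop_eq_nil_of_le (by omega)]
      simp [caRest]

-- ===== VERDICT (by name: the statement is the Claim_ definition above) =====
theorem combine_args_spec : Claim_equal_combine_args := by
  intro args _ _
  unfold Spec_combine_args combine_args combine_args_alt
  rw [PySem.List.slice_from_one, (fold_eq args.tail).1,
    outer_eq args args.length 1 (by omega), ← List.drop_one]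
  rfl
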